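-- pv_equiv track=rewrite | github.com/pjr2359/GreekConjugator | scripts/parse_enwiktionary.py | split_template_parts
-- ===== SOURCE A (Python) =====
-- def split_template_parts(template_body: str) -> list[str]:
--     parts = []
--     current = []
--     depth = 0
--     i = 0
--     while i < len(template_body):
--         if template_body[i : i + 2] == "{{":
--             depth += 1
--             current.append("{{")
--             i += 2
--             continue
--         if template_body[i : i + 2] == "}}" and depth > 0:
--             depth -= 1
--             current.append("}}")
--             i += 2
--             continue
--         if template_body[i] == "|" and depth == 0:
--             parts.append("".join(current))
--             current = []
--             i += 1
--             continue
--         current.append(template_body[i])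
--         i += 1
--     parts.append("".join(current))
--     return parts
-- ===== SOURCE B (Python) =====
-- def split_template_parts(template_body: str) -> list[str]:
--     # One pass records only the offsets of top-level '|' separators; parts are slices.
--     bounds = []
--     depth = 0
--     i = 0
--     n = len(template_body)
--     while i < n:
--         c = template_body[i]
--         if c == "{" and template_body[i + 1 : i + 2] == "{":
--             depth += 1
--             i += 2
--         elif c == "}" and depth > 0 and template_body[i + 1 : i + 2] == "}":
--             depth -= 1
--             i += 2
--         else:
--             if c == "|" and depth == 0:
--                 bounds.append(i)
--             i += 1
--     starts = [0] + [b + 1 for b in bounds]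
--     ends = bounds + [n]
--     return [template_body[a:b] for a, b in zip(starts, ends)]
-- ===== Notes on version B (the rewrite author's own statement) =====
-- stated objective: faster
-- what changed: B no longer accumulates per-part character buffers: one pass records only the offsets of the top-level pipe separators, then the parts are produced as slices of the original string between consecutive boundaries.
import Mathlib
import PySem

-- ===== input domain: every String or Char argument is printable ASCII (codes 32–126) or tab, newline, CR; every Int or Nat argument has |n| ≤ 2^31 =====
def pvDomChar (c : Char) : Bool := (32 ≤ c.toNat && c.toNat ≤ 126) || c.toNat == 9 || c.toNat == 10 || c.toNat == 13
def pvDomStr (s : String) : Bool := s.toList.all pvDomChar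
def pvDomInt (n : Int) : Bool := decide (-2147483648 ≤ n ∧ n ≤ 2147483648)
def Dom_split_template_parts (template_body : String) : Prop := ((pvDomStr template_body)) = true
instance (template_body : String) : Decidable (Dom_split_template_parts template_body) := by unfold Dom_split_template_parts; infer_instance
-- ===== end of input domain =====

-- B records only the offsets of top-level '|' separators and produces the parts as slices of the
-- original string, instead of accumulating per-part character buffers (constant-factor faster).

-- ===== PORT A =====
-- A's while-loop: state = (parts, current, depth); current is accumulated piece by piece.
def pvLoopA : List Char → Int → List (List Char) → List Char → List (List Char)
  | [], _, parts, cur => parts ++ [cur]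
  | '{' :: '{' :: rest, d, parts, cur => pvLoopA rest (d + 1) parts (cur ++ ['{', '{'])
  | '}' :: '}' :: rest, d, parts, cur =>
      if d > 0 then pvLoopA rest (d - 1) parts (cur ++ ['}', '}'])
      else pvLoopA ('}' :: rest) d parts (cur ++ ['}'])
  | c :: rest, d, parts, cur =>
      if c = '|' ∧ d = 0 then pvLoopA rest d (parts ++ [cur]) []
      else pvLoopA rest d parts (cur ++ [c])
termination_by s => s.length

def split_template_parts (template_body : String) : List String :=
  (pvLoopA template_body.toList 0 [] []).map (fun cs => String.ofList cs)

-- ===== PORT B =====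
-- B's single pass: record only the indices of top-level '|' characters.
def pvLoopB : List Char → Nat → Int → List Nat → List Nat
  | [], _, _, bs => bs
  | '{' :: '{' :: rest, i, d, bs => pvLoopB rest (i + 2) (d + 1) bs
  | '}' :: '}' :: rest, i, d, bs =>
      if d > 0 then pvLoopB rest (i + 2) (d - 1) bs
      else pvLoopB ('}' :: rest) (i + 1) d bs
  | c :: rest, i, d, bs =>
      if c = '|' ∧ d = 0 then pvLoopB rest (i + 1) d (bs ++ [i])
      else pvLoopB rest (i + 1) d bs
termination_by s => s.length

def split_template_parts_alt (template_body : String) : List String :=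
  let full := template_body.toList
  let bs : List Nat := pvLoopB full 0 0 []
  let starts : List Nat := 0 :: bs.map (· + 1)
  let ends : List Nat := bs ++ [full.length]
  (starts.zip ends).map
    (fun p => String.ofList (PySem.List.slice full (some ((p.1 : Nat) : Int)) (some ((p.2 : Nat) : Int))))

-- ===== PRECONDITION & SPEC =====
def Spec_split_template_parts (template_body : String) (out : List String) : Prop := out = split_template_parts_alt template_body
instance (template_body : String) (out : List String) : Decidable (Spec_split_template_parts template_body out) := by unfold Spec_split_template_parts; infer_instance

-- ===== CLAIM (what is proved, stated in full; the proofs are below) =====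
def Claim_equal_split_template_parts : Prop := ∀ (template_body : String), Dom_split_template_parts template_body → Spec_split_template_parts template_body (split_template_parts template_body)

-- ===== LEMMAS AND PROOFS =====

/-- Apply a function to the head of a list (identity on `[]`). -/
def pvMapHead (f : List Char → List Char) : List (List Char) → List (List Char)
  | [] => []
  | x :: xs => f x :: xs

/-- Common characterisation of both loops: the list of top-level segments of the input. -/
def pvSegs : List Char → Int → List (List Char)
  | [], _ => [[]]
  | '{' :: '{' :: rest, d => pvMapHead (fun x => ['{', '{'] ++ x) (pvSegs rest (d + 1))
  | '}' :: '}' :: rest, d =>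
      if d > 0 then pvMapHead (fun x => ['}', '}'] ++ x) (pvSegs rest (d - 1))
      else pvMapHead (fun x => ['}'] ++ x) (pvSegs ('}' :: rest) d)
  | c :: rest, d =>
      if c = '|' ∧ d = 0 then [] :: pvSegs rest d
      else pvMapHead (fun x => [c] ++ x) (pvSegs rest d)
termination_by s => s.length

lemma pvMapHead_ne_nil (f : List Char → List Char) (l : List (List Char)) (h : l ≠ []) :
    pvMapHead f l ≠ [] := by
  cases l with
  | nil => exact absurd rfl h
  | cons x xs => simp [pvMapHead]

lemma pvSegs_ne_nil (s : List Char) (d : Int) : pvSegs s d ≠ [] := by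
  fun_induction pvSegs s d <;>
    first
      | exact pvMapHead_ne_nil _ _ (by assumption)
      | simp

lemma pvMapHead_mapHead (f g : List Char → List Char) (l : List (List Char)) :
    pvMapHead f (pvMapHead g l) = pvMapHead (fun x => f (g x)) l := by
  cases l <;> simp [pvMapHead]

lemma pvMapHead_id (l : List (List Char)) : pvMapHead (fun x => [] ++ x) l = l := by
  cases l <;> simp [pvMapHead]

lemma pvLoopA_eq (s : List Char) (d : Int) (parts : List (List Char)) (cur : List Char) :
    pvLoopA s d parts cur = parts ++ pvMapHead (fun x => cur ++ x) (pvSegs s d) := by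
  fun_induction pvLoopA s d parts cur with
  | case1 => simp [pvSegs, pvMapHead]
  | case2 _ _ _ _ ih =>
      rw [ih, pvSegs.eq_2, pvMapHead_mapHead]; simp [List.append_assoc]
  | case3 _ _ _ _ h ih =>
      rw [ih, pvSegs.eq_3, if_pos h, pvMapHead_mapHead]; simp [List.append_assoc]
  | case4 _ _ _ _ h ih =>
      rw [ih, pvSegs.eq_3, if_neg h, pvMapHead_mapHead]; simp [List.append_assoc]
  | case5 c rest _ _ _ h1 h2 hif ih =>
      rw [ih, pvSegs.eq_4 _ _ _ h1 h2, if_pos hif, pvMapHead_id]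
      cases hs : pvSegs rest _ with
      | nil => exact absurd hs (pvSegs_ne_nil _ _)
      | cons t ts => simp [pvMapHead]
  | case6 c rest _ _ _ h1 h2 hif ih =>
      rw [ih, pvSegs.eq_4 _ _ _ h1 h2, if_neg hif, pvMapHead_mapHead]
      simp [List.append_assoc]

/-- Joining the segments with `'|'` gives back the input. -/
def pvJoin : List (List Char) → List Char
  | [] => []
  | [x] => x
  | x :: xs => x ++ '|' :: pvJoin xs

lemma pvJoin_mapHead (p : List Char) (l : List (List Char)) (h : l ≠ []) :
    pvJoin (pvMapHead (fun x => p ++ x) l) = p ++ pvJoin l := by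
  cases l with
  | nil => exact absurd rfl h
  | cons x xs => cases xs <;> simp [pvMapHead, pvJoin, List.append_assoc]

lemma pvJoin_nil_cons (t : List (List Char)) (h : t ≠ []) :
    pvJoin ([] :: t) = '|' :: pvJoin t := by
  cases t with
  | nil => exact absurd rfl h
  | cons x xs => simp [pvJoin]

lemma pvJoin_segs (s : List Char) (d : Int) : pvJoin (pvSegs s d) = s := by
  fun_induction pvSegs s d with
  | case1 => simp [pvJoin]
  | case2 _ _ ih =>
      rw [pvJoin_mapHead _ _ (pvSegs_ne_nil _ _), ih]; rfl
  | case3 _ _ h ih =>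
      rw [pvJoin_mapHead _ _ (pvSegs_ne_nil _ _), ih]; rfl
  | case4 _ _ h ih =>
      rw [pvJoin_mapHead _ _ (pvSegs_ne_nil _ _), ih]; rfl
  | case5 c rest _ h1 h2 hif ih =>
      rw [pvJoin_nil_cons _ (pvSegs_ne_nil _ _), ih, hif.1]
  | case6 c rest _ h1 h2 hif ih =>
      rw [pvJoin_mapHead _ _ (pvSegs_ne_nil _ _), ih]; rfl

/-- Offsets of the '|' separators between consecutive segments, first segment starting at `i`. -/
def pvBnds : Nat → List (List Char) → List Nat
  | _, [] => []
  | _, [_] => []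
  | i, x :: xs => (i + x.length) :: pvBnds (i + x.length + 1) xs

lemma pvBnds_mapHead (p : List Char) (i : Nat) (l : List (List Char)) (h : l ≠ []) :
    pvBnds i (pvMapHead (fun x => p ++ x) l) = pvBnds (i + p.length) l := by
  cases l with
  | nil => exact absurd rfl h
  | cons x xs =>
    cases xs with
    | nil => simp [pvMapHead, pvBnds]
    | cons y ys =>
      have e : i + (p ++ x).length = i + p.length + x.length := by
        simp [List.length_append]; omega
      simp only [pvMapHead, pvBnds, e]

lemma pvBnds_nil_cons (i : Nat) (t : List (List Char)) (h : t ≠ []) :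
    pvBnds i ([] :: t) = i :: pvBnds (i + 1) t := by
  cases t with
  | nil => exact absurd rfl h
  | cons x xs => simp [pvBnds]

lemma pvLoopB_eq (s : List Char) (i : Nat) (d : Int) (bs : List Nat) :
    pvLoopB s i d bs = bs ++ pvBnds i (pvSegs s d) := by
  fun_induction pvLoopB s i d bs with
  | case1 => simp [pvSegs, pvBnds]
  | case2 _ _ _ _ ih =>
      rw [ih, pvSegs.eq_2, pvBnds_mapHead _ _ _ (pvSegs_ne_nil _ _)]; rfl
  | case3 _ _ _ _ h ih =>
      rw [ih, pvSegs.eq_3, if_pos h, pvBnds_mapHead _ _ _ (pvSegs_ne_nil _ _)]; rfl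
  | case4 _ _ _ _ h ih =>
      rw [ih, pvSegs.eq_3, if_neg h, pvBnds_mapHead _ _ _ (pvSegs_ne_nil _ _)]; rfl
  | case5 c rest _ _ _ h1 h2 hif ih =>
      rw [ih, pvSegs.eq_4 _ _ _ h1 h2, if_pos hif,
        pvBnds_nil_cons _ _ (pvSegs_ne_nil _ _)]
      simp
  | case6 c rest _ _ _ h1 h2 hif ih =>
      rw [ih, pvSegs.eq_4 _ _ _ h1 h2, if_neg hif, pvBnds_mapHead _ _ _ (pvSegs_ne_nil _ _)]; rfl

/-- Slicing between consecutive boundaries recovers the segments. -/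
lemma pvSlices (xs : List (List Char)) : ∀ (x pre : List Char),
    (((pre.length :: (pvBnds pre.length (x :: xs)).map (· + 1)).zip
        (pvBnds pre.length (x :: xs) ++ [(pre ++ pvJoin (x :: xs)).length])).map
      (fun p => PySem.List.slice (pre ++ pvJoin (x :: xs)) (some ((p.1 : Nat) : Int)) (some ((p.2 : Nat) : Int))))
    = x :: xs := by
  induction xs with
  | nil =>
    intro x pre
    have hbn : pvBnds pre.length [x] = [] := by simp [pvBnds]
    have hj : pvJoin [x] = x := by simp [pvJoin]
    rw [hbn, hj]
    simp only [List.map_nil, List.nil_append, List.zip_cons_cons, List.zip_nil_right,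
      List.map_cons, List.map_nil]
    congr 1
    show PySem.List.slice (pre ++ x) (some ((pre.length : Nat) : Int))
        (some (((pre ++ x).length : Nat) : Int)) = x
    rw [PySem.List.slice_natCast, List.drop_left]
    have h2 : (pre ++ x).length - pre.length = x.length := by simp
    rw [h2, List.take_length]
  | cons y ys ih =>
    intro x pre
    have hj : pvJoin (x :: y :: ys) = x ++ '|' :: pvJoin (y :: ys) := by simp [pvJoin]
    have hb : pvBnds pre.length (x :: y :: ys)
        = (pre.length + x.length) :: pvBnds (pre.length + x.length + 1) (y :: ys) := by
      simp [pvBnds]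
    have hpre : (pre ++ x ++ ['|']).length = pre.length + x.length + 1 := by
      simp only [List.length_append, List.length_cons, List.length_nil]
    have hfull2 : (pre ++ x ++ ['|']) ++ pvJoin (y :: ys) = pre ++ pvJoin (x :: y :: ys) := by
      rw [hj]; simp
    have happ := ih y (pre ++ x ++ ['|'])
    rw [hpre, hfull2] at happ
    rw [hb]
    simp only [List.map_cons, List.cons_append, List.zip_cons_cons, List.map_cons]
    rw [happ]
    congr 1
    show PySem.List.slice (pre ++ pvJoin (x :: y :: ys)) (some ((pre.length : Nat) : Int))
        (some (((pre.length + x.length : Nat)) : Int)) = x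
    rw [PySem.List.slice_natCast,
      show pre ++ pvJoin (x :: y :: ys) = pre ++ (x ++ '|' :: pvJoin (y :: ys)) from by rw [hj],
      List.drop_left]
    have h2 : pre.length + x.length - pre.length = x.length := by omega
    rw [h2]
    exact List.take_left

-- ===== VERDICT (by name: the statement is the Claim_ definition above) =====
theorem split_template_parts_spec : Claim_equal_split_template_parts := by
  intro tb _hdom
  unfold Spec_split_template_parts
  have hA : split_template_parts tb = (pvSegs tb.toList 0).map String.ofList := by
    unfold split_template_parts
    rw [pvLoopA_eq, pvMapHead_id, List.nil_append]
  cases hs : pvSegs tb.toList 0 with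
  | nil => exact absurd hs (pvSegs_ne_nil _ _)
  | cons x xs =>
    have hfull : tb.toList = pvJoin (x :: xs) := by rw [← hs, pvJoin_segs]
    have key := pvSlices xs x []
    simp only [List.length_nil, List.nil_append] at key
    have hB : split_template_parts_alt tb = (x :: xs).map String.ofList := by
      show (((0 :: (pvLoopB tb.toList 0 0 []).map (· + 1)).zip
              ((pvLoopB tb.toList 0 0 []) ++ [tb.toList.length])).map
            (fun p => String.ofList (PySem.List.slice tb.toList (some ((p.1 : Nat) : Int)) (some ((p.2 : Nat) : Int)))))
          = (x :: xs).map String.ofList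
      rw [pvLoopB_eq, List.nil_append, hs, hfull]
      rw [show (fun (p : Nat × Nat) => String.ofList (PySem.List.slice (pvJoin (x :: xs)) (some ((p.1 : Nat) : Int)) (some ((p.2 : Nat) : Int))))
            = String.ofList ∘ (fun (p : Nat × Nat) => PySem.List.slice (pvJoin (x :: xs)) (some ((p.1 : Nat) : Int)) (some ((p.2 : Nat) : Int))) from rfl,
        ← List.map_map, key]
    rw [hA, hs, hB]
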